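-- pv_equiv track=rewrite | github.com/dawoodaijaz97/Leetcode | maximum-k-to-sort-a-permutation/solution.py | solve
-- ===== SOURCE A (Python) =====
-- def solve(nums: list[int]) -> int:
--     n = len(nums)
--     sorted_nums = sorted(nums)
--
--     # If already sorted, return 0
--     if nums == sorted_nums:
--         return 0
--
--     max_k = 0
--
--     for i in range(n):
--         for j in range(i + 1, n):
--             k = nums[i] & nums[j]
--             if k > 0:
--                 # Check if swapping nums[i] and nums[j] helps in sorting
--                 nums[i], nums[j] = nums[j], nums[i]
--                 if nums == sorted_nums:
--                     max_k = max(max_k, k)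
--                 nums[i], nums[j] = nums[j], nums[i]  # Swap back to original
--
--     return max_k
-- ===== SOURCE B (Python) =====
-- def solve(nums: list[int]) -> int:
--     s = sorted(nums)
--     d = [i for i in range(len(nums)) if nums[i] != s[i]]
--     if len(d) == 2:
--         i, j = d
--         if nums[i] == s[j] and nums[j] == s[i]:
--             k = nums[i] & nums[j]
--             if k > 0:
--                 return k
--     return 0
-- ===== Notes on version B (the rewrite author's own statement) =====
-- stated objective: faster
-- what changed: Instead of trying every pair (i,j) and comparing the whole swapped list against the sorted list (O(n^3)), B sorts once, collects the mismatch positions, and only if there are exactly two of them checks that the single cross-swap sorts and returns the AND of the two values.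
import Mathlib
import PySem

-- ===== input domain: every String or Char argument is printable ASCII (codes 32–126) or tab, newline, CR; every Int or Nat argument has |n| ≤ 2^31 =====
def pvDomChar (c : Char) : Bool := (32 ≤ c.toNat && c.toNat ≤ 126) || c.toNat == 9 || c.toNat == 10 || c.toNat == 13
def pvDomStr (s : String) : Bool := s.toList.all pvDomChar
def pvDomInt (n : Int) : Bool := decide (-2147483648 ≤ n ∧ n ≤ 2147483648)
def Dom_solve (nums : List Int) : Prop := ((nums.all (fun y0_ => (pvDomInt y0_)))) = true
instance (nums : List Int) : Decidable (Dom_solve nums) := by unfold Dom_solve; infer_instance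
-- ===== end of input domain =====

-- B replaces A's try-every-pair-and-compare-whole-list search by collecting the mismatch
-- positions against the sorted list once and checking the single candidate swap (faster).
-- A transiently swaps two elements of nums in place and swaps them back; the net effect on
-- nums is nil, so the functional port below is exact.

-- ===== PORT A =====
def solve (nums : List Int) : Int :=
  let n : Int := nums.length
  let sorted_nums := PySem.List.sorted nums (fun x => x) false
  if nums = sorted_nums then 0
  else
    (PySem.List.pyRange 0 n).foldl (fun max_k i =>
      (PySem.List.pyRange (i + 1) n).foldl (fun max_k j =>
        let k := PySem.Int.band (PySem.List.pyGetD nums i 0) (PySem.List.pyGetD nums j 0)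
        if k > 0 then
          -- Python swaps nums[i],nums[j] in place, compares with sorted_nums, swaps back;
          -- i and j come from range(n) so .toNat / List.set are exact here.
          let swapped := (nums.set i.toNat (PySem.List.pyGetD nums j 0)).set j.toNat
              (PySem.List.pyGetD nums i 0)
          if swapped = sorted_nums then max max_k k else max_k
        else max_k) max_k) 0

-- ===== PORT B =====
def solve_alt (nums : List Int) : Int :=
  let s := PySem.List.sorted nums (fun x => x) false
  let d := (PySem.List.pyRange 0 (nums.length : Int)).filter
      (fun i => PySem.List.pyGetD nums i 0 != PySem.List.pyGetD s i 0)
  match d with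
  | [i, j] =>
      if PySem.List.pyGetD nums i 0 = PySem.List.pyGetD s j 0 ∧
          PySem.List.pyGetD nums j 0 = PySem.List.pyGetD s i 0 then
        let k := PySem.Int.band (PySem.List.pyGetD nums i 0) (PySem.List.pyGetD nums j 0)
        if k > 0 then k else 0
      else 0
  | _ => 0

-- ===== PRECONDITION & SPEC =====
def Spec_solve (nums : List Int) (out : Int) : Prop := out = solve_alt nums
instance (nums : List Int) (out : Int) : Decidable (Spec_solve nums out) := by unfold Spec_solve; infer_instance

-- ===== CLAIM (what is proved, stated in full; the proofs are below) =====
def Claim_equal_solve : Prop := ∀ (nums : List Int), Dom_solve nums → Spec_solve nums (solve nums)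

-- ===== LEMMAS AND PROOFS =====

def pvP (nums s : List Int) (t : Nat) : Bool := nums.getD t 0 != s.getD t 0

def pvDiffs (nums s : List Int) : List Nat := (List.range nums.length).filter (pvP nums s)

def pvSwap (nums : List Int) (a b : Nat) : List Int :=
  (nums.set a (nums.getD b 0)).set b (nums.getD a 0)

abbrev pvC (nums s : List Int) (i j : Int) : Prop :=
  0 < PySem.Int.band (PySem.List.pyGetD nums i 0) (PySem.List.pyGetD nums j 0) ∧
  (nums.set i.toNat (PySem.List.pyGetD nums j 0)).set j.toNat (PySem.List.pyGetD nums i 0) = s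

lemma pvDiffs_mem (nums s : List Int) (x : Nat) :
    x ∈ pvDiffs nums s ↔ x < nums.length ∧ pvP nums s x = true := by
  simp [pvDiffs, List.mem_filter, List.mem_range]

lemma pvDiffs_pairwise (nums s : List Int) : (pvDiffs nums s).Pairwise (· < ·) :=
  (List.pairwise_lt_range).filter _

lemma pvP_eq_true_iff (nums s : List Int) (t : Nat) :
    pvP nums s t = true ↔ ¬ nums.getD t 0 = s.getD t 0 := by
  show (nums.getD t 0 != s.getD t 0) = true ↔ _
  exact bne_iff_ne

lemma pvPairwiseTwo {l : List Nat} {a b : Nat} (hp : l.Pairwise (· < ·)) (hab : a < b)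
    (hm : ∀ x, x ∈ l ↔ x = a ∨ x = b) : l = [a, b] := by
  have ha : a ∈ l := (hm a).2 (Or.inl rfl)
  have hb : b ∈ l := (hm b).2 (Or.inr rfl)
  cases l with
  | nil => simp at ha
  | cons x t =>
    cases t with
    | nil => simp at ha hb; omega
    | cons y r =>
      rw [List.pairwise_cons] at hp
      obtain ⟨hx, hp⟩ := hp
      rw [List.pairwise_cons] at hp
      obtain ⟨hy, _⟩ := hp
      have hxa : x = a := by
        rcases (hm x).1 (by simp) with h | h
        · exact h
        · rcases List.mem_cons.1 ha with h1 | h1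
          · omega
          · have := hx a h1; omega
      subst hxa
      have hyb : y = b := by
        rcases (hm y).1 (by simp) with h | h
        · have := hx y (by simp); omega
        · exact h
      subst hyb
      have hr : r = [] := by
        cases r with
        | nil => rfl
        | cons z q =>
          have hz := (hm z).1 (by simp)
          have h1 := hx z (by simp)
          have h2 := hy z (by simp)
          omega
      rw [hr]

lemma pvExtGetD {l₁ l₂ : List Int} (hl : l₁.length = l₂.length)
    (h : ∀ t, t < l₁.length → l₁.getD t 0 = l₂.getD t 0) : l₁ = l₂ := by
  apply List.ext_getElem hl
  intro i h1 h2
  have := h i h1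
  simpa [List.getD_eq_getElem?_getD, List.getElem?_eq_getElem, h1, h2] using this

lemma pvSwap_length (nums : List Int) (a b : Nat) :
    (pvSwap nums a b).length = nums.length := by simp [pvSwap]

lemma pvSwap_getD (nums : List Int) (a b t : Nat) (ha : a < nums.length)
    (hb : b < nums.length) :
    (pvSwap nums a b).getD t 0 =
      if t = b then nums.getD a 0 else if t = a then nums.getD b 0 else nums.getD t 0 := by
  unfold pvSwap
  simp only [List.getD_eq_getElem?_getD, List.getElem?_set, List.length_set]
  by_cases htb : b = t
  · rw [if_pos htb, if_pos hb, if_pos htb.symm]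
    simp
  · rw [if_neg htb]
    by_cases hta : a = t
    · rw [if_pos hta, if_pos ha, if_neg (fun h => htb h.symm), if_pos hta.symm]
      simp
    · rw [if_neg hta, if_neg (fun h => htb h.symm), if_neg (fun h => hta h.symm)]

lemma pvSwap_eq_iff {nums s : List Int} {a b : Nat} (hsl : s.length = nums.length)
    (hab : a < b) (hb : b < nums.length) :
    pvSwap nums a b = s ↔
      ((∀ t, t < nums.length → t ≠ a → t ≠ b → nums.getD t 0 = s.getD t 0) ∧
        nums.getD b 0 = s.getD a 0 ∧ nums.getD a 0 = s.getD b 0) := by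
  constructor
  · intro h
    have hg : ∀ t, t < nums.length → (pvSwap nums a b).getD t 0 = s.getD t 0 := by
      intro t _; rw [h]
    refine ⟨?_, ?_, ?_⟩
    · intro t ht hta htb
      have := hg t ht
      rwa [pvSwap_getD nums a b t (by omega) hb, if_neg htb, if_neg hta] at this
    · have := hg a (by omega)
      rwa [pvSwap_getD nums a b a (by omega) hb, if_neg (by omega), if_pos rfl] at this
    · have := hg b hb
      rwa [pvSwap_getD nums a b b (by omega) hb, if_pos rfl] at this
  · rintro ⟨h1, h2, h3⟩
    apply pvExtGetD (by rw [pvSwap_length, hsl])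
    intro t ht
    rw [pvSwap_length] at ht
    rw [pvSwap_getD nums a b t (by omega) hb]
    by_cases htb : t = b
    · subst htb; rw [if_pos rfl]; exact h3
    · by_cases hta : t = a
      · subst hta; rw [if_neg htb, if_pos rfl]; exact h2
      · rw [if_neg htb, if_neg hta]; exact h1 t ht hta htb

lemma pvDiffs_nil_iff {nums s : List Int} (hsl : s.length = nums.length) :
    pvDiffs nums s = [] ↔ nums = s := by
  constructor
  · intro h
    apply pvExtGetD hsl.symm
    intro t ht
    by_contra hne
    have : t ∈ pvDiffs nums s := (pvDiffs_mem nums s t).2 ⟨ht, (pvP_eq_true_iff nums s t).2 hne⟩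
    simp [h] at this
  · intro h
    subst h
    simp [pvDiffs, pvP]

lemma pvDiffs_of_swap_eq {nums s : List Int} {a b : Nat} (hsl : s.length = nums.length)
    (hns : nums ≠ s) (hab : a < b) (hb : b < nums.length)
    (h : pvSwap nums a b = s) :
    pvDiffs nums s = [a, b] ∧ nums.getD b 0 = s.getD a 0 ∧ nums.getD a 0 = s.getD b 0 := by
  obtain ⟨h1, h2, h3⟩ := (pvSwap_eq_iff hsl hab hb).1 h
  have hna : nums.getD a 0 ≠ s.getD a 0 := by
    intro he
    apply hns
    apply pvExtGetD hsl.symm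
    intro t ht
    by_cases hta : t = a
    · exact hta ▸ he
    · by_cases htb : t = b
      · subst htb; rw [h2, ← he]; exact h3
      · exact h1 t ht hta htb
  have hnb : nums.getD b 0 ≠ s.getD b 0 := by
    intro he
    exact hna (by rw [h3, ← he]; exact h2)
  refine ⟨?_, h2, h3⟩
  apply pvPairwiseTwo (pvDiffs_pairwise nums s) hab
  intro x
  rw [pvDiffs_mem]
  constructor
  · rintro ⟨hx, hpx⟩
    by_contra hc
    push Not at hc
    rw [pvP_eq_true_iff] at hpx
    exact hpx (h1 x hx hc.1 hc.2)
  · rintro (rfl | rfl)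
    · exact ⟨by omega, (pvP_eq_true_iff nums s x).2 hna⟩
    · exact ⟨hb, (pvP_eq_true_iff nums s x).2 hnb⟩

lemma pvSwap_eq_of_diffs {nums s : List Int} {a b : Nat} (hsl : s.length = nums.length)
    (hd : pvDiffs nums s = [a, b])
    (h2 : nums.getD b 0 = s.getD a 0) (h3 : nums.getD a 0 = s.getD b 0) :
    a < b ∧ b < nums.length ∧ pvSwap nums a b = s := by
  have hpw := pvDiffs_pairwise nums s
  rw [hd] at hpw
  have hab : a < b := by simp [List.pairwise_cons] at hpw; omega
  have hb : b < nums.length := ((pvDiffs_mem nums s b).1 (by simp [hd])).1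
  refine ⟨hab, hb, ?_⟩
  rw [pvSwap_eq_iff hsl hab hb]
  refine ⟨?_, h2, h3⟩
  intro t ht hta htb
  by_contra hne
  have : t ∈ pvDiffs nums s := (pvDiffs_mem nums s t).2 ⟨ht, (pvP_eq_true_iff nums s t).2 hne⟩
  rw [hd] at this
  simp at this
  omega

lemma pvFoldNone {α : Type} (L : List α) (c : α → Prop) [DecidablePred c] (v : α → Int)
    (a : Int) (h : ∀ x ∈ L, ¬ c x) :
    L.foldl (fun acc x => if c x then max acc (v x) else acc) a = a := by
  rw [PySem.List.foldl_congr_mem L _ (fun acc _ => acc) a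
    (fun acc x hx => if_neg (h x hx)), PySem.List.foldl_ignore]

lemma pvFoldUnique {α : Type} [DecidableEq α] (L : List α) (c : α → Prop) [DecidablePred c]
    (v : α → Int) (x0 : α) (a : Int) (h : ∀ x ∈ L, c x → x = x0) :
    L.foldl (fun acc x => if c x then max acc (v x) else acc) a
      = if x0 ∈ L ∧ c x0 then max a (v x0) else a := by
  induction L generalizing a with
  | nil => simp
  | cons x t ih =>
    by_cases hcx : c x
    · have hx0 : x = x0 := h x (by simp) hcx
      subst hx0
      rw [List.foldl_cons, if_pos hcx, ih _ (fun y hy hcy => h y (List.mem_cons_of_mem x hy) hcy)]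
      by_cases hmem : x ∈ t ∧ c x
      · rw [if_pos hmem, if_pos ⟨by simp, hcx⟩, max_assoc, max_self]
      · rw [if_neg hmem, if_pos ⟨by simp, hcx⟩]
    · rw [List.foldl_cons, if_neg hcx, ih _ (fun y hy hcy => h y (List.mem_cons_of_mem x hy) hcy)]
      by_cases hmem : x0 ∈ t ∧ c x0
      · rw [if_pos hmem, if_pos ⟨by simp [hmem.1], hmem.2⟩]
      · rw [if_neg hmem, if_neg ?_]
        rintro ⟨hm, hc0⟩
        rcases List.mem_cons.1 hm with rfl | hm'
        · exact hcx hc0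
        · exact hmem ⟨hm', hc0⟩

lemma pvSolveA_eval {nums : List Int}
    (hns : ¬ nums = PySem.List.sorted nums (fun x => x) false) :
    solve nums =
      (PySem.List.pyRange 0 (nums.length : Int)).foldl (fun max_k i =>
        (PySem.List.pyRange (i + 1) (nums.length : Int)).foldl (fun acc j =>
          if pvC nums (PySem.List.sorted nums (fun x => x) false) i j
          then max acc
            (PySem.Int.band (PySem.List.pyGetD nums i 0) (PySem.List.pyGetD nums j 0))
          else acc) max_k) 0 := by
  unfold solve
  simp only []
  rw [if_neg hns]
  apply PySem.List.foldl_congr_mem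
  intro acc i _
  apply PySem.List.foldl_congr_mem
  intro acc' j _
  simp only [pvC]
  split_ifs <;> first | rfl | tauto

lemma pvD_eval (nums : List Int) :
    ((PySem.List.pyRange 0 (nums.length : Int)).filter
      (fun i => PySem.List.pyGetD nums i 0 !=
        PySem.List.pyGetD (PySem.List.sorted nums (fun x => x) false) i 0))
    = List.map (fun t : Nat => (t : Int)) (pvDiffs nums (PySem.List.sorted nums (fun x => x) false)) := by
  rw [PySem.List.pyRange_one]
  simp only [sub_zero, Int.toNat_natCast, zero_add]
  rw [List.filter_map, pvDiffs]
  apply congrArg (List.map fun t : Nat => (t : Int))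
  apply List.filter_congr
  intro x _
  simp [Function.comp_def, PySem.List.pyGetD_natCast, pvP, List.getD_eq_getElem?_getD]

lemma pvA_none {nums s : List Int}
    (h : ∀ i j : Int, 0 ≤ i → i < j → j < (nums.length : Int) → ¬ pvC nums s i j) :
    (PySem.List.pyRange 0 (nums.length : Int)).foldl (fun max_k i =>
        (PySem.List.pyRange (i + 1) (nums.length : Int)).foldl (fun acc j =>
          if pvC nums s i j
          then max acc
            (PySem.Int.band (PySem.List.pyGetD nums i 0) (PySem.List.pyGetD nums j 0))
          else acc) max_k) 0 = 0 := by
  rw [PySem.List.foldl_congr_mem _ _ (fun acc _ => acc) 0 ?_, PySem.List.foldl_ignore]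
  intro acc i hi
  rw [PySem.List.mem_pyRange_one] at hi
  apply pvFoldNone
  intro j hj
  rw [PySem.List.mem_pyRange_one] at hj
  exact h i j hi.1 (by omega) (by omega)

lemma pvA_good {nums s : List Int} {a b : Nat} (hab : a < b) (hb : b < nums.length)
    (hgood : pvC nums s (a : Int) (b : Int))
    (huniq : ∀ i j : Int, 0 ≤ i → i < j → j < (nums.length : Int) → pvC nums s i j →
      i = (a : Int) ∧ j = (b : Int)) :
    (PySem.List.pyRange 0 (nums.length : Int)).foldl (fun max_k i =>
        (PySem.List.pyRange (i + 1) (nums.length : Int)).foldl (fun acc j =>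
          if pvC nums s i j
          then max acc
            (PySem.Int.band (PySem.List.pyGetD nums i 0) (PySem.List.pyGetD nums j 0))
          else acc) max_k) 0
    = max 0 (PySem.Int.band (PySem.List.pyGetD nums (a : Int) 0)
        (PySem.List.pyGetD nums (b : Int) 0)) := by
  rw [PySem.List.foldl_congr_mem _ _
    (fun acc i => if i = (a : Int)
      then max acc (PySem.Int.band (PySem.List.pyGetD nums (a : Int) 0)
        (PySem.List.pyGetD nums (b : Int) 0))
      else acc) 0 ?_]
  · rw [pvFoldUnique _ (fun i => i = (a : Int)) _ (a : Int) 0 (fun x _ hx => hx)]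
    rw [if_pos ⟨PySem.List.mem_pyRange_one.2 ⟨by omega, by omega⟩, rfl⟩]
  · intro acc i hi
    rw [PySem.List.mem_pyRange_one] at hi
    beta_reduce
    by_cases hia : i = (a : Int)
    · subst hia
      rw [if_pos rfl]
      rw [pvFoldUnique _ (pvC nums s (a : Int)) _ (b : Int) acc ?_]
      · rw [if_pos ⟨PySem.List.mem_pyRange_one.2 ⟨by omega, by omega⟩, hgood⟩]
      · intro j hj hcj
        rw [PySem.List.mem_pyRange_one] at hj
        exact (huniq _ _ hi.1 (by omega) (by omega) hcj).2
    · rw [if_neg hia]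
      apply pvFoldNone
      intro j hj hcj
      rw [PySem.List.mem_pyRange_one] at hj
      exact hia (huniq i j hi.1 (by omega) (by omega) hcj).1

lemma pvC_iff {nums s : List Int} {i j : Int} (h0 : 0 ≤ i) (h0' : 0 ≤ j) :
    pvC nums s i j ↔
      0 < PySem.Int.band (nums.getD i.toNat 0) (nums.getD j.toNat 0) ∧
        pvSwap nums i.toNat j.toNat = s := by
  rw [pvC, pvSwap, PySem.List.pyGetD_of_nonneg nums 0 h0, PySem.List.pyGetD_of_nonneg nums 0 h0']

lemma pvMain (nums : List Int) : solve nums = solve_alt nums := by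
  have hsl : (PySem.List.sorted nums (fun x => x) false).length = nums.length :=
    (PySem.List.sorted_perm nums (fun x => x) false).length_eq
  by_cases hns : nums = PySem.List.sorted nums (fun x => x) false
  · have hd : pvDiffs nums (PySem.List.sorted nums (fun x => x) false) = [] :=
      (pvDiffs_nil_iff hsl).2 hns
    unfold solve solve_alt
    rw [if_pos hns]
    simp only [pvD_eval nums, hd, List.map_nil]
  · rw [pvSolveA_eval hns]
    unfold solve_alt
    cases hd : pvDiffs nums (PySem.List.sorted nums (fun x => x) false) with
    | nil => exact absurd ((pvDiffs_nil_iff hsl).1 hd) hns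
    | cons a t =>
      cases t with
      | nil =>
        simp only [pvD_eval nums, hd, List.map_cons, List.map_nil]
        rw [pvA_none ?_]
        intro i j h0 hij hjn hc
        obtain ⟨hk, hsw⟩ := (pvC_iff h0 (by omega)).1 hc
        have hres := pvDiffs_of_swap_eq hsl hns (by omega) (by omega) hsw
        rw [hd] at hres
        simp at hres
      | cons b t' =>
        cases t' with
        | cons c r =>
          simp only [pvD_eval nums, hd, List.map_cons, List.map_nil]
          rw [pvA_none ?_]
          intro i j h0 hij hjn hc
          obtain ⟨hk, hsw⟩ := (pvC_iff h0 (by omega)).1 hc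
          have hres := pvDiffs_of_swap_eq hsl hns (by omega) (by omega) hsw
          rw [hd] at hres
          simp at hres
        | nil =>
          have hpw := pvDiffs_pairwise nums (PySem.List.sorted nums (fun x => x) false)
          rw [hd] at hpw
          have hab : a < b := by simp [List.pairwise_cons] at hpw; omega
          have hb : b < nums.length :=
            ((pvDiffs_mem nums (PySem.List.sorted nums (fun x => x) false) b).1 (by simp [hd])).1
          simp only [pvD_eval nums, hd, List.map_cons, List.map_nil,
            PySem.List.pyGetD_natCast]
          by_cases hcross :
              nums.getD a 0 = (PySem.List.sorted nums (fun x => x) false).getD b 0 ∧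
              nums.getD b 0 = (PySem.List.sorted nums (fun x => x) false).getD a 0
          · have hswap := (pvSwap_eq_of_diffs hsl hd hcross.2 hcross.1).2.2
            by_cases hk : 0 < PySem.Int.band (nums.getD a 0) (nums.getD b 0)
            · have hgood : pvC nums (PySem.List.sorted nums (fun x => x) false) (a : Int) (b : Int) := by
                rw [pvC_iff (Int.natCast_nonneg a) (Int.natCast_nonneg b)]
                simp only [Int.toNat_natCast]
                exact ⟨hk, hswap⟩
              have huniq : ∀ i j : Int, 0 ≤ i → i < j → j < (nums.length : Int) →
                  pvC nums (PySem.List.sorted nums (fun x => x) false) i j →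
                  i = (a : Int) ∧ j = (b : Int) := by
                intro i j h0 hij hjn hc
                obtain ⟨hk', hsw⟩ := (pvC_iff h0 (by omega)).1 hc
                have hres := pvDiffs_of_swap_eq hsl hns (by omega) (by omega) hsw
                rw [hd] at hres
                obtain ⟨hres, -⟩ := hres
                simp only [List.cons.injEq, and_true] at hres
                omega
              rw [pvA_good hab hb hgood huniq]
              simp only [PySem.List.pyGetD_natCast]
              rw [if_pos hcross, if_pos hk, max_eq_right (le_of_lt hk)]
            · rw [pvA_none ?_]
              · rw [if_pos hcross, if_neg hk]
              · intro i j h0 hij hjn hc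
                obtain ⟨hk', hsw⟩ := (pvC_iff h0 (by omega)).1 hc
                have hres := pvDiffs_of_swap_eq hsl hns (by omega) (by omega) hsw
                rw [hd] at hres
                obtain ⟨hres, -⟩ := hres
                simp only [List.cons.injEq, and_true] at hres
                apply hk
                rw [hres.1, hres.2]
                exact hk'
          · rw [pvA_none ?_]
            · rw [if_neg hcross]
            · intro i j h0 hij hjn hc
              obtain ⟨hk', hsw⟩ := (pvC_iff h0 (by omega)).1 hc
              have hres := pvDiffs_of_swap_eq hsl hns (by omega) (by omega) hsw
              rw [hd] at hres
              obtain ⟨hres, h2, h3⟩ := hres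
              simp only [List.cons.injEq, and_true] at hres
              exact hcross ⟨by rw [hres.1, hres.2]; exact h3, by rw [hres.1, hres.2]; exact h2⟩

theorem solve_spec : Claim_equal_solve := by
  intro nums _
  unfold Spec_solve
  exact pvMain nums
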